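-- pv_equiv track=rewrite | github.com/vananle/GCRINT | routing/util_ls.py | is_simple_path
-- ===== SOURCE A (Python) =====
-- def is_simple_path(path):
--     edges = []
--     for u, v in zip(path[:-1], path[1:]):
--         edge = tuple(sorted(set([u, v])))
--         if edge in edges:
--             return False
--         edges.append(edge)
--     return True
-- ===== SOURCE B (Python) =====
-- def is_simple_path(path):
--     edges = sorted(tuple(sorted(set((u, v)))) for u, v in zip(path, path[1:]))
--     return all(a != b for a, b in zip(edges, edges[1:]))
-- ===== Notes on version B (the rewrite author's own statement) =====
-- stated objective: faster
-- what changed: Replaces A's accumulate-edges-with-linear-membership early-exit loop by sort-then-scan: build all undirected edge keys, sort them, and check that no two adjacent sorted keys are equal.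
import Mathlib
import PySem

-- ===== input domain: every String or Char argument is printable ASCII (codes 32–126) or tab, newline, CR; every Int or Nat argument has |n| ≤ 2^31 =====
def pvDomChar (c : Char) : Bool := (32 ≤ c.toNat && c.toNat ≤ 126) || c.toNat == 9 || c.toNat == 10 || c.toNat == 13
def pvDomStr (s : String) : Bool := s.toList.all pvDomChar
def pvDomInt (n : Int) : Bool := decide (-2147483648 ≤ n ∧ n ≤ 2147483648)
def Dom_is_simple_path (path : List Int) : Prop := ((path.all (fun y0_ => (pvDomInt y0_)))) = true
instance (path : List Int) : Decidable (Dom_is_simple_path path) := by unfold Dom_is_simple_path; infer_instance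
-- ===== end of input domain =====

-- B sorts the undirected edge keys and checks that no two adjacent sorted keys are equal,
-- replacing A's accumulate-with-membership early-exit loop (alternative algorithm).

-- ===== PORT A =====
-- tuple(sorted(set([u, v]))): for Int endpoints this is (u,) when u = v else (min, max);
-- encoded as the pair (min u v, max u v), an injective, order-preserving encoding of the key.
def pvEdgeKey (u v : Int) : Int × Int := (min u v, max u v)

-- the for-loop of A with accumulator `edges` and early return False
def pvALoop : List (Int × Int) → List (Int × Int) → Bool
  | [], _ => true
  | (u, v) :: rest, edges =>
      let edge := pvEdgeKey u v
      if edge ∈ edges then false else pvALoop rest (edges ++ [edge])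

def is_simple_path (path : List Int) : Bool :=
  pvALoop ((PySem.List.slice path none (some (-1))).zip (PySem.List.slice path (some 1) none)) []

-- ===== PORT B =====
-- sorted(edges): Python compares the key tuples lexicographically; the (min,max) pair
-- encoding preserves that order, so the sort is by the lexicographic order on Int ×ₗ Int.
def is_simple_path_alt (path : List Int) : Bool :=
  let edges := PySem.List.sorted
    ((path.zip (PySem.List.slice path (some 1) none)).map (fun p => pvEdgeKey p.1 p.2))
    (fun p => (toLex p : Lex (Int × Int)))
  (edges.zip edges.tail).all (fun p => p.1 != p.2)

-- ===== PRECONDITION & SPEC =====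
def Spec_is_simple_path (path : List Int) (out : Bool) : Prop := out = is_simple_path_alt path
instance (path : List Int) (out : Bool) : Decidable (Spec_is_simple_path path out) := by unfold Spec_is_simple_path; infer_instance

-- ===== CLAIM (what is proved, stated in full; the proofs are below) =====
def Claim_equal_is_simple_path : Prop := ∀ (path : List Int), Dom_is_simple_path path → Spec_is_simple_path path (is_simple_path path)

-- ===== LEMMAS AND PROOFS =====

-- "all adjacent pairs distinct" as B computes it
def pvAdjNe (l : List (Int × Int)) : Bool := (l.zip l.tail).all (fun p => p.1 != p.2)

theorem pvZip_dropLast_tail {α : Type} : ∀ (l : List α), l.dropLast.zip l.tail = l.zip l.tail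
  | [] => rfl
  | [_] => rfl
  | a :: b :: t => by
    simp only [List.dropLast, List.tail, List.zip_cons_cons]
    have := pvZip_dropLast_tail (b :: t)
    simp only [List.tail] at this
    rw [this]

theorem pvALoop_true_iff : ∀ (ps : List (Int × Int)) (edges : List (Int × Int)),
    edges.Nodup → (pvALoop ps edges = true ↔ (edges ++ ps.map (fun p => pvEdgeKey p.1 p.2)).Nodup)
  | [], edges => by
    intro h
    simpa [pvALoop] using h
  | (u, v) :: rest, edges => by
    intro h
    simp only [pvALoop, List.map_cons]
    by_cases hmem : pvEdgeKey u v ∈ edges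
    · simp only [hmem, if_true]
      constructor
      · intro hfalse; cases hfalse
      · intro hnd
        exact absurd rfl ((List.nodup_append.mp hnd).2.2 _ hmem _ List.mem_cons_self)
    · simp only [hmem, if_false]
      have hnd' : (edges ++ [pvEdgeKey u v]).Nodup := by
        simp [List.nodup_append, h]
        intro a b hab heq
        exact hmem (heq ▸ hab)
      rw [pvALoop_true_iff rest (edges ++ [pvEdgeKey u v]) hnd']
      constructor
      · intro hx; simpa [List.append_assoc] using hx
      · intro hx; simpa [List.append_assoc] using hx

-- a lex-weakly-increasing list with all adjacent pairs distinct is lex-strictly increasing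
theorem pvPairwiseLt : ∀ (l : List (Int × Int)),
    l.Pairwise (fun a b => (toLex a : Lex (Int × Int)) ≤ toLex b) → pvAdjNe l = true →
    l.Pairwise (fun a b => (toLex a : Lex (Int × Int)) < toLex b)
  | [] => by intro _ _; exact List.Pairwise.nil
  | [a] => by intro _ _; simp
  | a :: c :: t => by
    intro hp hadj
    obtain ⟨ha, hp'⟩ := List.pairwise_cons.mp hp
    have hadj' : pvAdjNe (c :: t) = true := by
      simp only [pvAdjNe, List.tail, List.zip_cons_cons, List.all_cons, Bool.and_eq_true] at hadj ⊢
      exact hadj.2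
    have hac : a ≠ c := by
      simp only [pvAdjNe, List.tail, List.zip_cons_cons, List.all_cons, Bool.and_eq_true] at hadj
      exact bne_iff_ne.mp hadj.1
    have ih := pvPairwiseLt (c :: t) hp' hadj'
    obtain ⟨hc, _⟩ := List.pairwise_cons.mp ih
    have haltc : (toLex a : Lex (Int × Int)) < toLex c :=
      lt_of_le_of_ne (ha c List.mem_cons_self) (fun h => hac (toLex_inj.mp h))
    refine List.pairwise_cons.mpr ⟨?_, ih⟩
    intro b hb
    rcases List.mem_cons.mp hb with rfl | hbt
    · exact haltc
    · exact haltc.trans (hc b hbt)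

-- a duplicate-free list has all adjacent pairs distinct
theorem pvAdjNe_of_nodup : ∀ (l : List (Int × Int)), l.Nodup → pvAdjNe l = true
  | [] => by intro _; rfl
  | [_] => by intro _; rfl
  | a :: c :: t => by
    intro h
    obtain ⟨ha, h'⟩ := List.nodup_cons.mp h
    have := pvAdjNe_of_nodup (c :: t) h'
    simp only [pvAdjNe, List.tail, List.zip_cons_cons, List.all_cons, Bool.and_eq_true] at this ⊢
    exact ⟨bne_iff_ne.mpr (fun hEq => ha (hEq ▸ List.mem_cons_self)), this⟩

-- B's adjacent test on the sorted list decides Nodup of the key list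
theorem pvSortedAdjNe_iff (keys : List (Int × Int)) :
    pvAdjNe (PySem.List.sorted keys (fun p => (toLex p : Lex (Int × Int)))) = true ↔ keys.Nodup := by
  set ks := PySem.List.sorted keys (fun p => (toLex p : Lex (Int × Int))) with hks
  have hperm : ks.Perm keys := PySem.List.sorted_perm keys _ false
  constructor
  · intro hadj
    have hpw := PySem.List.sorted_pairwise keys (fun p => (toLex p : Lex (Int × Int)))
    have hlt := pvPairwiseLt ks (by exact hpw) hadj
    have hnd : ks.Nodup := hlt.imp (fun {a b} h => fun hEq => absurd (hEq ▸ h) (lt_irrefl _))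
    exact hperm.nodup_iff.mp hnd
  · intro hnd
    exact pvAdjNe_of_nodup ks (hperm.nodup_iff.mpr hnd)

-- ===== VERDICT (by name: the statement is the Claim_ definition above) =====
theorem is_simple_path_spec : Claim_equal_is_simple_path := by
  intro path _
  unfold Spec_is_simple_path is_simple_path is_simple_path_alt
  rw [PySem.List.slice_to_neg_one, PySem.List.slice_from_one, pvZip_dropLast_tail]
  set keys := (path.zip path.tail).map (fun p => pvEdgeKey p.1 p.2) with hkeys
  have hA := pvALoop_true_iff (path.zip path.tail) [] List.nodup_nil
  simp only [List.nil_append, ← hkeys] at hA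
  have hB := pvSortedAdjNe_iff keys
  simp only [pvAdjNe] at hB
  by_cases hnd : keys.Nodup
  · rw [hA.mpr hnd, hB.mpr hnd]
  · have h1 : pvALoop (path.zip path.tail) [] = false := by
      cases hb : pvALoop (path.zip path.tail) [] with
      | true => exact absurd (hA.mp hb) hnd
      | false => rfl
    have h2 : ((PySem.List.sorted keys (fun p => (toLex p : Lex (Int × Int)))).zip
        (PySem.List.sorted keys (fun p => (toLex p : Lex (Int × Int)))).tail).all
        (fun p => p.1 != p.2) = false := by
      cases hb : ((PySem.List.sorted keys (fun p => (toLex p : Lex (Int × Int)))).zip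
          (PySem.List.sorted keys (fun p => (toLex p : Lex (Int × Int)))).tail).all
          (fun p => p.1 != p.2) with
      | true => exact absurd (hB.mp hb) hnd
      | false => rfl
    rw [h1, h2]
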